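-- pv_equiv track=rewrite | github.com/JokerLdg/Algorithm_python | Algorithm_interview/10_array_partition_1.py | array_pair_sort
-- ===== SOURCE A (Python) =====
-- def array_pair_sort(nums: list[int]) -> int:
--     total = 0
--     pair = []
--     nums.sort()
--
--     for n in nums:
--         # 앞에서부터 오름차순으로 페어를 만들어서 합 계산
--         pair.append(n)
--         if len(pair) == 2:
--             total += min(pair)
--             pair = []
--
--     return total
-- ===== SOURCE B (Python) =====
-- def array_pair_sort(nums: list[int]) -> int:
--     # Sorts nums in place (same observable mutation as the original).
--     nums.sort()
--     return sum(nums[i] for i in range(0, len(nums) - 1, 2))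
-- ===== Notes on version B (the rewrite author's own statement) =====
-- stated objective: simpler
-- what changed: Replaces the pair-buffer accumulation loop (append, len==2 test, min, reset) by a direct stride-2 sum of the even-indexed elements of the sorted list, using the fact that in a sorted list the min of each adjacent pair is its first element.
import Mathlib
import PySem

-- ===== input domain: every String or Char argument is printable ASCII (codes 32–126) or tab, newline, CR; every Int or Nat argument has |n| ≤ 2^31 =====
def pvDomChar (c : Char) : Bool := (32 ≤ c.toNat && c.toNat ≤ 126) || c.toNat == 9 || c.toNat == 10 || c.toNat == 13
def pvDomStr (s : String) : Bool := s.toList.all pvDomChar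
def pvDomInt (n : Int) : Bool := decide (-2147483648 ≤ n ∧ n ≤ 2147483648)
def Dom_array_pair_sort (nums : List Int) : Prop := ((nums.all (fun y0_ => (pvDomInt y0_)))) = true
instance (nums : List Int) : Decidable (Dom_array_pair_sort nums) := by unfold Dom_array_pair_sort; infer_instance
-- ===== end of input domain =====

-- B replaces A's pair-buffer loop by a stride-2 sum of even-indexed elements of the
-- sorted list (same cost, simpler). Both Pythons sort `nums` in place (same mutation);
-- the equivalence proved here is about the return value.


-- ===== PORT A =====
-- The named loop body of A's for-loop: append n to pair; on a full pair add min(pair)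
-- to total and reset. `min(pair)` is only reached with pair = [x, n] (never empty),
-- so the `.getD 0` default of `min?` is never used.
def pairStep (st : Int × List Int) (n : Int) : Int × List Int :=
  let pair := st.2 ++ [n]
  if pair.length = 2 then
    (st.1 + ((PySem.List.min? pair (fun x => x)).getD 0), [])
  else
    (st.1, pair)

def array_pair_sort (nums : List Int) : Int :=
  let s := PySem.List.sorted nums (fun x => x) false
  let st := s.foldl pairStep ((0 : Int), ([] : List Int))
  st.1

-- ===== PORT B =====
def array_pair_sort_alt (nums : List Int) : Int :=
  let s := PySem.List.sorted nums (fun x => x) false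
  (PySem.List.pyRange 0 ((s.length : Int) - 1) 2).foldl
    (fun acc i => acc + PySem.List.pyGetD s i 0) 0

-- ===== PRECONDITION & SPEC =====
def Spec_array_pair_sort (nums : List Int) (out : Int) : Prop := out = array_pair_sort_alt nums
instance (nums : List Int) (out : Int) : Decidable (Spec_array_pair_sort nums out) := by unfold Spec_array_pair_sort; infer_instance

-- ===== CLAIM (what is proved, stated in full; the proofs are below) =====
def Claim_equal_array_pair_sort : Prop := ∀ (nums : List Int), Dom_array_pair_sort nums → Spec_array_pair_sort nums (array_pair_sort nums)

-- ===== LEMMAS AND PROOFS =====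

-- Sum of the first element of each complete adjacent pair.
def pairsum : List Int → Int
  | [] => 0
  | [_] => 0
  | x :: _ :: r => x + pairsum r

-- A's loop, on a (≤)-pairwise-sorted list, computes `t + pairsum l`.
theorem loopA_eq_pairsum (l : List Int) (hl : l.Pairwise (· ≤ ·)) (t : Int) :
    (l.foldl pairStep (t, ([] : List Int))).1 = t + pairsum l := by
  induction l using pairsum.induct generalizing t with
  | case1 => simp [pairsum]
  | case2 x => simp [pairsum, pairStep]
  | case3 x y r ih =>
    have hxy : x ≤ y := by
      rcases List.pairwise_cons.1 hl with ⟨h1, _⟩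
      exact h1 y (by simp)
    have hr : r.Pairwise (· ≤ ·) := by
      rcases List.pairwise_cons.1 hl with ⟨_, h2⟩
      exact (List.pairwise_cons.1 h2).2
    have h1 : pairStep (t, []) x = (t, [x]) := by simp [pairStep]
    have h2 : pairStep (t, [x]) y = (t + min x y, []) := by
      norm_num [pairStep, PySem.List.min?_id_cons]
    rw [List.foldl_cons, List.foldl_cons, h1, h2, ih hr]
    simp [pairsum, min_eq_left hxy]
    ring

-- Fold-as-sum over List.range.
theorem foldl_range_add (f : Nat → Int) (c : Nat) :
    (List.range c).foldl (fun acc k => acc + f k) 0 = ∑ k ∈ Finset.range c, f k := by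
  have gen : ∀ (c : Nat) (t : Int),
      (List.range c).foldl (fun acc k => acc + f k) t = t + ∑ k ∈ Finset.range c, f k := by
    intro c
    induction c with
    | zero => simp
    | succ n ih =>
      intro t
      rw [List.range_succ, List.foldl_append, ih, Finset.sum_range_succ]
      simp [add_assoc]
  simpa using gen c 0

-- The stride-2 indexed sum over a list equals `pairsum`.
theorem sum_stride (l : List Int) :
    ∑ k ∈ Finset.range (l.length / 2), PySem.List.pyGetD l (0 + 2 * (k : Int)) 0 = pairsum l := by
  induction l using pairsum.induct with
  | case1 => simp [pairsum]
  | case2 x => simp [pairsum]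
  | case3 x y r ih =>
    have hlen : (x :: y :: r).length / 2 = r.length / 2 + 1 := by simp; omega
    rw [hlen, Finset.sum_range_succ']
    have h0 : PySem.List.pyGetD (x :: y :: r) (0 + 2 * ((0 : Nat) : Int)) 0 = x := by
      norm_num [PySem.List.pyGetD_zero_cons]
    have hs : ∀ k ∈ Finset.range (r.length / 2),
        PySem.List.pyGetD (x :: y :: r) (0 + 2 * ((k + 1 : Nat) : Int)) 0
          = PySem.List.pyGetD r (0 + 2 * (k : Int)) 0 := by
      intro k _
      have e1 : (0 + 2 * ((k + 1 : Nat) : Int)) = ((2 * k + 2 : Nat) : Int) := by push_cast; ring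
      have e2 : (0 + 2 * ((k : Nat) : Int)) = ((2 * k : Nat) : Int) := by push_cast; ring
      rw [e1, e2, PySem.List.pyGetD_natCast, PySem.List.pyGetD_natCast]
      simp
    rw [Finset.sum_congr rfl hs, ih, h0, pairsum, add_comm]

-- B's stride-2 fold over a list equals `pairsum`.
theorem strideB_eq_pairsum (l : List Int) :
    (PySem.List.pyRange 0 ((l.length : Int) - 1) 2).foldl
      (fun acc i => acc + PySem.List.pyGetD l i 0) 0 = pairsum l := by
  rw [PySem.List.pyRange_of_pos 0 ((l.length : Int) - 1) (by norm_num)]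
  have hc : (if (0:Int) < (l.length : Int) - 1 then
      (((l.length : Int) - 1 - 0 + 2 - 1) / 2).toNat else 0) = l.length / 2 := by
    split_ifs with h
    · omega
    · omega
  rw [hc, List.foldl_map, foldl_range_add (fun k => PySem.List.pyGetD l (0 + 2 * (k : Int)) 0)]
  exact sum_stride l

-- ===== VERDICT (by name: the statement is the Claim_ definition above) =====
theorem array_pair_sort_spec : Claim_equal_array_pair_sort := by
  intro nums _
  unfold Spec_array_pair_sort array_pair_sort array_pair_sort_alt
  rw [loopA_eq_pairsum _ (PySem.List.sorted_pairwise nums (fun x => x)), strideB_eq_pairsum]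
  ring
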